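-- pv_equiv track=rewrite | github.com/BenBrock/pytorch | torch/distributed/tensor/_nvshmem_utils.py | _max_strided_local_size
-- ===== SOURCE A (Python) =====
-- def _chunk_sizes(length: int, num_chunks: int) -> list[int]:
--     if num_chunks <= 0:
--         return [length]
--     if length <= 0:
--         return [0] * num_chunks
--     chunk = (length + num_chunks - 1) // num_chunks
--     sizes = []
--     for i in range(num_chunks):
--         start = i * chunk
--         sizes.append(max(min(chunk, length - start), 0))
--     return sizes
--
-- def _max_strided_local_size(length: int, num_chunks: int, split_factor: int) -> int:
--     if length <= 0:
--         return 0
--     if split_factor <= 0: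
--         return 0
--     first_sizes = _chunk_sizes(length, split_factor)
--     per_rank = [0] * num_chunks
--     for size in first_sizes:
--         second_sizes = _chunk_sizes(size, num_chunks)
--         for rank in range(num_chunks):
--             per_rank[rank] += second_sizes[rank]
--     return max(per_rank) if per_rank else 0
-- ===== SOURCE B (Python) =====
-- def _max_strided_local_size(length: int, num_chunks: int, split_factor: int) -> int:
--     # Closed form: the per-rank totals are maximal at rank 0, and the first-level
--     # chunk list is (k-1) full chunks of size c plus one remainder chunk.
--     if length <= 0 or split_factor <= 0 or num_chunks <= 0:
--         return 0
--     c = -(-length // split_factor)        # ceil(length / split_factor)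
--     k = -(-length // c)                   # number of non-empty first-level chunks
--     rem = length - (k - 1) * c            # size of the last non-empty chunk
--     return (k - 1) * (-(-c // num_chunks)) + (-(-rem // num_chunks))
-- ===== Notes on version B (the rewrite author's own statement) =====
-- stated objective: faster
-- what changed: B replaces A's two-level chunk construction and per-rank accumulation loops by an O(1) closed form: the per-rank totals are maximal at rank 0, and rank 0's total is (k-1)*ceil(c/num_chunks) + ceil(rem/num_chunks) where c = ceil(length/split_factor), k is the number of non-empty first-level chunks and rem the last one's size.
import Mathlib
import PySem

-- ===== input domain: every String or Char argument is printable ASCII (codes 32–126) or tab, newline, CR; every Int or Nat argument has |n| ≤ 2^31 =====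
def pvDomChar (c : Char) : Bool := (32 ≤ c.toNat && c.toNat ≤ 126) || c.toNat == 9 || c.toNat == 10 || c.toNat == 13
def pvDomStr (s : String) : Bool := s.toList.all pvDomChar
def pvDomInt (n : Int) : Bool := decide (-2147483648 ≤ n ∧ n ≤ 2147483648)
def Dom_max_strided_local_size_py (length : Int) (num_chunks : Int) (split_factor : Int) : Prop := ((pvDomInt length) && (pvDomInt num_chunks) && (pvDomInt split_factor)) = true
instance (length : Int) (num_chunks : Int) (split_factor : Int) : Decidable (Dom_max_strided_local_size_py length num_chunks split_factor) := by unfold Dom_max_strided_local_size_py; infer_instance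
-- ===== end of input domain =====

-- B replaces A's nested chunk loops by an O(1) closed form (rank 0 always attains the max).

-- ===== PORT A =====
-- port of _chunk_sizes
def pvChunkSizes (length : Int) (num_chunks : Int) : List Int :=
  if num_chunks ≤ 0 then [length]
  else if length ≤ 0 then List.replicate num_chunks.toNat 0
  else
    let chunk := PySem.Int.floordiv (length + num_chunks - 1) num_chunks
    (PySem.List.pyRange 0 num_chunks 1).foldl
      (fun sizes i => sizes ++ [max (min chunk (length - i * chunk)) 0]) []

def max_strided_local_size_py (length : Int) (num_chunks : Int) (split_factor : Int) : Int :=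
  if length ≤ 0 then 0
  else if split_factor ≤ 0 then 0
  else
    let first_sizes := pvChunkSizes length split_factor
    let per_rank : List Int := List.replicate num_chunks.toNat 0
    let per_rank := first_sizes.foldl (fun pr size =>
      let second_sizes := pvChunkSizes size num_chunks
      (PySem.List.pyRange 0 num_chunks 1).foldl
        (fun pr2 rank =>
          pr2.set rank.toNat (PySem.List.pyGetD pr2 rank 0 + PySem.List.pyGetD second_sizes rank 0))
        pr) per_rank
    if per_rank ≠ [] then
      match PySem.List.max? per_rank (fun x => x) with
      | some m => m
      | none => 0
    else 0

-- ===== PORT B =====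
def max_strided_local_size_py_alt (length : Int) (num_chunks : Int) (split_factor : Int) : Int :=
  if length ≤ 0 ∨ split_factor ≤ 0 ∨ num_chunks ≤ 0 then 0
  else
    let c := -(PySem.Int.floordiv (-length) split_factor)
    let k := -(PySem.Int.floordiv (-length) c)
    let rem := length - (k - 1) * c
    (k - 1) * (-(PySem.Int.floordiv (-c) num_chunks)) + (-(PySem.Int.floordiv (-rem) num_chunks))

-- ===== PRECONDITION & SPEC =====
def Spec_max_strided_local_size_py (length : Int) (num_chunks : Int) (split_factor : Int) (out : Int) : Prop := out = max_strided_local_size_py_alt length num_chunks split_factor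
instance (length : Int) (num_chunks : Int) (split_factor : Int) (out : Int) : Decidable (Spec_max_strided_local_size_py length num_chunks split_factor out) := by unfold Spec_max_strided_local_size_py; infer_instance

-- ===== CLAIM (what is proved, stated in full; the proofs are below) =====
def Claim_equal_max_strided_local_size_py : Prop := ∀ (length : Int) (num_chunks : Int) (split_factor : Int), Dom_max_strided_local_size_py length num_chunks split_factor → Spec_max_strided_local_size_py length num_chunks split_factor (max_strided_local_size_py length num_chunks split_factor)

-- ===== LEMMAS AND PROOFS =====

-- ceiling division written the way B writes it
def pvCeilDiv (a b : Int) : Int := -(PySem.Int.floordiv (-a) b)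

-- the second-level chunk size that rank r receives from a first-level chunk of size s
def pvG (n : Int) (s : Int) (r : Nat) : Int :=
  if s ≤ 0 then 0
  else max (min (PySem.Int.floordiv (s + n - 1) n)
      (s - (r : Int) * PySem.Int.floordiv (s + n - 1) n)) 0

theorem pvCeilDiv_bounds {a b : Int} (hb : 0 < b) :
    (pvCeilDiv a b - 1) * b < a ∧ a ≤ pvCeilDiv a b * b :=
  (PySem.Int.neg_floordiv_neg_eq_iff_of_pos hb).mp rfl

theorem pvFloorCeil {a b : Int} (hb : 0 < b) :
    PySem.Int.floordiv (a + b - 1) b = pvCeilDiv a b := by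
  obtain ⟨h1, h2⟩ := pvCeilDiv_bounds (a := a) hb
  rw [PySem.Int.floordiv_eq_iff_of_pos hb]
  constructor <;> nlinarith

theorem pvRange_eq {n : Int} (hn : 0 < n) :
    PySem.List.pyRange 0 n 1 = (List.range n.toNat).map (fun k : Nat => (k : Int)) := by
  conv_lhs => rw [show n = ((n.toNat : Nat) : Int) from by omega]
  exact PySem.List.pyRange_zero_natCast n.toNat

theorem pvChunkSizes_eq_map {s n : Int} (hn : 0 < n) :
    pvChunkSizes s n = (List.range n.toNat).map (pvG n s) := by
  simp only [pvChunkSizes, if_neg (show ¬ n ≤ 0 by omega)]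
  by_cases hs : s ≤ 0
  · rw [if_pos hs]
    apply List.ext_getElem
    · simp
    · intro i h1 h2
      simp [pvG, hs]
  · rw [if_neg hs, pvRange_eq hn, PySem.List.foldl_append_singleton_eq_map,
      List.nil_append, List.map_map]
    apply List.map_congr_left
    intro r _
    simp [pvG, hs]

-- a map over a range with one position overwritten
theorem pvSet_map_range {h : Nat → Int} {n m : Nat} (_hm : m < n) (y : Int) :
    ((List.range n).map h).set m y
      = (List.range n).map (fun r => if r = m then y else h r) := by
  apply List.ext_getElem
  · simp
  · intro i h1 h2
    simp only [List.getElem_set, List.getElem_map, List.getElem_range]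
    split_ifs <;> omega

-- the inner `for rank in range(num_chunks)` loop, over Nat indices
theorem pvInnerFold_aux (F G : Nat → Int) (n : Nat) :
    ∀ (m : Nat), m ≤ n →
    (List.range m).foldl
        (fun pr r => pr.set r (pr.getD r 0 + ((List.range n).map G).getD r 0))
        ((List.range n).map F)
      = (List.range n).map (fun r => if r < m then F r + G r else F r) := by
  intro m
  induction m with
  | zero => intro _; simp
  | succ m ih =>
    intro hm
    rw [List.range_succ, List.foldl_append, ih (by omega)]
    simp only [List.foldl_cons, List.foldl_nil]
    rw [PySem.List.getD_map_range _ _ _ _ (by omega),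
      PySem.List.getD_map_range _ _ _ _ (by omega)]
    rw [if_neg (by omega)]
    rw [pvSet_map_range (by omega)]
    apply List.map_congr_left
    intro r _
    by_cases hrm : r = m
    · subst hrm
      rw [if_pos rfl, if_pos (by omega)]
    · rw [if_neg hrm]
      by_cases hlt : r < m
      · rw [if_pos hlt, if_pos (by omega)]
      · rw [if_neg hlt, if_neg (by omega)]

-- the same loop the way the port writes it: over pyRange with Int ranks
theorem pvInnerFold (F G : Nat → Int) {n : Int} (hn : 0 < n) :
    (PySem.List.pyRange 0 n 1).foldl
        (fun pr2 rank =>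
          pr2.set rank.toNat
            (PySem.List.pyGetD pr2 rank 0
              + PySem.List.pyGetD ((List.range n.toNat).map G) rank 0))
        ((List.range n.toNat).map F)
      = (List.range n.toNat).map (fun r => F r + G r) := by
  rw [pvRange_eq hn, List.foldl_map]
  have hext := List.foldl_ext
    (fun (pr : List Int) (r : Nat) =>
      pr.set ((r : Int)).toNat
        (PySem.List.pyGetD pr (r : Int) 0
          + PySem.List.pyGetD ((List.range n.toNat).map G) (r : Int) 0))
    (fun (pr : List Int) (r : Nat) =>
      pr.set r (pr.getD r 0 + ((List.range n.toNat).map G).getD r 0))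
    ((List.range n.toNat).map F)
    (l := List.range n.toNat)
    (by intro pr r _
        simp [PySem.List.pyGetD_natCast])
  rw [hext]
  have := pvInnerFold_aux F G n.toNat n.toNat (le_refl _)
  rw [this]
  apply List.map_congr_left
  intro r hr
  rw [if_pos (by simpa using hr)]

-- the outer `for size in first_sizes` loop
theorem pvOuterFold {n : Int} (hn : 0 < n) (sizes : List Int) :
    ∀ (F : Nat → Int),
    sizes.foldl (fun pr size =>
      (PySem.List.pyRange 0 n 1).foldl
        (fun pr2 rank =>
          pr2.set rank.toNat
            (PySem.List.pyGetD pr2 rank 0 + PySem.List.pyGetD (pvChunkSizes size n) rank 0))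
        pr) ((List.range n.toNat).map F)
      = (List.range n.toNat).map
          (fun r => F r + (sizes.map (fun s => pvG n s r)).sum) := by
  induction sizes with
  | nil => intro F; simp
  | cons s rest ih =>
    intro F
    simp only [List.foldl_cons]
    rw [pvChunkSizes_eq_map hn, pvInnerFold F (pvG n s) hn, ih]
    apply List.map_congr_left
    intro r _
    simp only [List.map_cons, List.sum_cons]
    ring

-- max? returns the head when the head dominates the tail
theorem pvMax?_head {x : Int} {t : List Int} (h : ∀ y ∈ t, y ≤ x) :
    PySem.List.max? (x :: t) (fun z => z) = some x := by
  unfold PySem.List.max?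
  simp only [List.foldl_cons]
  induction t with
  | nil => rfl
  | cons y rest ih =>
    simp only [List.foldl_cons]
    rw [if_neg (by have := h y (by simp); omega)]
    exact ih (fun z hz => h z (by simp [hz]))

-- rank 0 gets the ceiling share of a positive chunk
theorem pvG_zero {n s : Int} (hn : 0 < n) (hs : 0 < s) :
    pvG n s 0 = pvCeilDiv s n := by
  simp only [pvG, if_neg (show ¬ s ≤ 0 by omega), pvFloorCeil hn,
    Nat.cast_zero, zero_mul]
  obtain ⟨h1, h2⟩ := pvCeilDiv_bounds (a := s) hn
  have hle : pvCeilDiv s n ≤ s := by nlinarith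
  have hge : 1 ≤ pvCeilDiv s n := by nlinarith
  omega

-- rank 0 dominates every rank
theorem pvG_le_zero {n s : Int} (hn : 0 < n) (r : Nat) :
    pvG n s r ≤ pvG n s 0 := by
  by_cases hs : s ≤ 0
  · simp [pvG, hs]
  · simp only [pvG, if_neg hs, pvFloorCeil hn, Nat.cast_zero, zero_mul]
    obtain ⟨h1, h2⟩ := pvCeilDiv_bounds (a := s) hn
    have hge : 1 ≤ pvCeilDiv s n := by nlinarith
    have hr0 : (0 : Int) ≤ (r : Int) * pvCeilDiv s n := by positivity
    omega

-- first-level chunk sizes characterised; summing the rank-0 shares gives the closed form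
theorem pvSum_closed {n L f : Int} (hn : 0 < n) (hL : 0 < L) (hf : 0 < f) :
    (((List.range f.toNat).map (pvG f L)).map (fun s => pvG n s 0)).sum
      = (pvCeilDiv L (pvCeilDiv L f) - 1) * pvCeilDiv (pvCeilDiv L f) n
        + pvCeilDiv (L - (pvCeilDiv L (pvCeilDiv L f) - 1) * pvCeilDiv L f) n := by
  obtain ⟨hc1, hc2⟩ := pvCeilDiv_bounds (a := L) hf
  have hcpos : 0 < pvCeilDiv L f := by nlinarith
  generalize hc : pvCeilDiv L f = c at *
  obtain ⟨hk1, hk2⟩ := pvCeilDiv_bounds (a := L) hcpos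
  have hkpos : 0 < pvCeilDiv L c := by nlinarith
  generalize hk : pvCeilDiv L c = k at *
  have hkf : k ≤ f := by
    by_contra hcon
    have h1 : f ≤ k - 1 := by omega
    have h2 : f * c ≤ (k - 1) * c := mul_le_mul_of_nonneg_right h1 hcpos.le
    nlinarith
  have hkc : (k - 1) * c + c = k * c := by ring
  have hrem1 : 0 < L - (k - 1) * c := by omega
  have hrem2 : L - (k - 1) * c ≤ c := by omega
  -- value of the i-th first-level chunk
  have hentry : ∀ i : Nat, (i : Int) < f →
      pvG f L i = if (i : Int) < k - 1 then c
        else if (i : Int) = k - 1 then L - (k - 1) * c else 0 := by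
    intro i hi
    simp only [pvG, if_neg (show ¬ L ≤ 0 by omega), pvFloorCeil hf, hc]
    by_cases h1 : (i : Int) < k - 1
    · rw [if_pos h1]
      have hb : ((i : Int) + 1) * c ≤ (k - 1) * c :=
        mul_le_mul_of_nonneg_right (by omega) hcpos.le
      have hcle : c ≤ L - (i : Int) * c := by nlinarith
      omega
    · rw [if_neg h1]
      by_cases h2 : (i : Int) = k - 1
      · rw [if_pos h2, h2]
        omega
      · rw [if_neg h2]
        have hb : k * c ≤ (i : Int) * c :=
          mul_le_mul_of_nonneg_right (by omega) hcpos.le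
        have hle : L - (i : Int) * c ≤ 0 := by omega
        omega
  -- rank-0 share of the i-th chunk
  have hshare : ∀ i ∈ List.range f.toNat,
      ((fun s => pvG n s 0) ∘ pvG f L) i
        = (if (i : Int) < k - 1 then pvCeilDiv c n
           else if (i : Int) = k - 1 then pvCeilDiv (L - (k - 1) * c) n else 0) := by
    intro i hi
    have hif : (i : Int) < f := by
      have := List.mem_range.mp hi; omega
    simp only [Function.comp_apply]
    rw [hentry i hif]
    split_ifs with h1 h2
    · exact pvG_zero hn hcpos
    · exact pvG_zero hn hrem1
    · simp [pvG]
  rw [List.map_map, List.map_congr_left hshare]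
  -- split the range at k-1 and k
  have hsplit : f.toNat = ((k - 1).toNat + 1) + (f.toNat - ((k - 1).toNat + 1)) := by omega
  rw [hsplit, List.range_add, List.map_append, List.sum_append, List.range_succ,
    List.map_append, List.sum_append]
  have e1 : ((List.range (k - 1).toNat).map (fun i : Nat =>
        (if (i : Int) < k - 1 then pvCeilDiv c n
         else if (i : Int) = k - 1 then pvCeilDiv (L - (k - 1) * c) n else 0))).sum
      = (k - 1) * pvCeilDiv c n := by
    rw [List.map_congr_left (g := fun _ => pvCeilDiv c n) (by
      intro i hi
      have := List.mem_range.mp hi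
      rw [if_pos (by omega)])]
    rw [PySem.List.sum_map_const_int]
    simp only [List.length_range]
    congr 1
    omega
  have e2 : (([(k - 1).toNat]).map (fun i =>
        (if ((i : Nat) : Int) < k - 1 then pvCeilDiv c n
         else if ((i : Nat) : Int) = k - 1 then pvCeilDiv (L - (k - 1) * c) n else 0))).sum
      = pvCeilDiv (L - (k - 1) * c) n := by
    simp only [List.map_cons, List.map_nil, List.sum_cons, List.sum_nil, add_zero]
    rw [if_neg (by omega), if_pos (by omega)]
  have e3 : ((List.map (fun j => ((k - 1).toNat + 1) + j)
        (List.range (f.toNat - ((k - 1).toNat + 1)))).map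
        (fun i => (if ((i : Nat) : Int) < k - 1 then pvCeilDiv c n
           else if ((i : Nat) : Int) = k - 1 then pvCeilDiv (L - (k - 1) * c) n else 0))).sum
      = 0 := by
    rw [List.map_map]
    rw [List.map_congr_left (g := fun _ => (0 : Int)) (by
      intro i _
      simp only [Function.comp_apply]
      rw [if_neg (by push_cast; omega), if_neg (by push_cast; omega)])]
    simp
  rw [e1, e2, e3]
  ring

-- the whole thing in the main case
theorem pvMain {L n f : Int} (hL : 0 < L) (hn : 0 < n) (hf : 0 < f) :
    max_strided_local_size_py L n f = max_strided_local_size_py_alt L n f := by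
  have hL' : ¬ L ≤ 0 := by omega
  have hf' : ¬ f ≤ 0 := by omega
  simp only [max_strided_local_size_py, if_neg hL', if_neg hf']
  have hrepl : (List.replicate n.toNat (0 : Int))
      = (List.range n.toNat).map (fun _ => (0 : Int)) := by
    simp
  rw [hrepl, pvOuterFold hn (pvChunkSizes L f) (fun _ => (0 : Int))]
  have hT : (List.range n.toNat).map
        (fun r => (fun _ => (0 : Int)) r + ((pvChunkSizes L f).map (fun s => pvG n s r)).sum)
      = (List.range n.toNat).map (fun r => ((pvChunkSizes L f).map (fun s => pvG n s r)).sum) := by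
    apply List.map_congr_left
    intro r _
    simp
  rw [hT]
  obtain ⟨m, hm⟩ : ∃ m, n.toNat = m + 1 := ⟨n.toNat - 1, by omega⟩
  rw [hm, List.range_succ_eq_map, List.map_cons, List.map_map]
  have hdom : ∀ y ∈ (List.range m).map
      ((fun r => ((pvChunkSizes L f).map (fun s => pvG n s r)).sum) ∘ Nat.succ),
      y ≤ ((pvChunkSizes L f).map (fun s => pvG n s 0)).sum := by
    intro y hy
    obtain ⟨r, _, rfl⟩ := List.mem_map.mp hy
    exact List.sum_le_sum (fun s _ => pvG_le_zero hn r.succ)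
  rw [if_pos (by simp), pvMax?_head hdom]
  simp only [max_strided_local_size_py_alt,
    if_neg (show ¬ (L ≤ 0 ∨ f ≤ 0 ∨ n ≤ 0) by omega)]
  rw [pvChunkSizes_eq_map hf, pvSum_closed hn hL hf]
  rfl

-- ===== VERDICT (by name: the statement is the Claim_ definition above) =====
theorem max_strided_local_size_py_spec : Claim_equal_max_strided_local_size_py := by
  intro L n f _
  unfold Spec_max_strided_local_size_py
  by_cases hL : L ≤ 0
  · simp only [max_strided_local_size_py, max_strided_local_size_py_alt,
      if_pos hL, if_pos (show L ≤ 0 ∨ f ≤ 0 ∨ n ≤ 0 from Or.inl hL)]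
  by_cases hf : f ≤ 0
  · simp only [max_strided_local_size_py, max_strided_local_size_py_alt,
      if_neg hL, if_pos hf, if_pos (show L ≤ 0 ∨ f ≤ 0 ∨ n ≤ 0 from Or.inr (Or.inl hf))]
  by_cases hn : n ≤ 0
  · simp only [max_strided_local_size_py, max_strided_local_size_py_alt,
      if_neg hL, if_neg hf,
      if_pos (show L ≤ 0 ∨ f ≤ 0 ∨ n ≤ 0 from Or.inr (Or.inr hn))]
    have hr : PySem.List.pyRange 0 n 1 = [] := PySem.List.pyRange_one_eq_nil (by omega)
    simp [hr]
    intro hpos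
    exact absurd hpos (by omega)
  · exact pvMain (L := L) (n := n) (f := f) (by omega) (by omega) (by omega)
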